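-- pv_equiv track=rewrite | github.com/Lotram/advent-of-code | src/bin/year_2017/day_06.py | part_1
-- ===== SOURCE A (Python) =====
-- def redistribute(blocks):
--     value = max(blocks)
--     size = len(blocks)
--     idx = blocks.index(max(blocks))
--     blocks[idx] = 0
--     return tuple(
--         blocks[i] + value // size + ((i - idx - 1) % size < value % size)
--         for i in range(size)
--     )
--
-- def part_1(text):
--     seen = set()
--     blocks = tuple(map(int, text.strip().split()))
--     result = 0
--     while blocks not in seen:
--         seen.add(blocks)
--         blocks = redistribute(list(blocks))
--         result += 1
--
--     return result
-- ===== SOURCE B (Python) =====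
-- def spread(blocks):
--     size = len(blocks)
--     value = max(blocks)
--     idx = blocks.index(value)
--     out = list(blocks)
--     out[idx] = 0
--     for step in range(value):
--         out[(idx + 1 + step) % size] += 1
--     return tuple(out)
--
-- def part_1(text):
--     history = []
--     t = tuple(int(x) for x in text.strip().split())
--     while t not in history:
--         history.append(t)
--         t = spread(t)
--     return len(history)
-- ===== Notes on version B (the rewrite author's own statement) =====
-- stated objective: alternative
-- what changed: The seen-set-plus-counter while loop becomes an ordered history list whose length is the answer, and A's one-shot closed-form modular redistribution formula becomes an explicit per-block ring walk that hands out one block per step.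
-- outside the precondition, e.g. on part_1('-5 -7'): A returns 4, B returns 2; on part_1('-4'): A returns 1, B returns 2
import Mathlib
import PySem

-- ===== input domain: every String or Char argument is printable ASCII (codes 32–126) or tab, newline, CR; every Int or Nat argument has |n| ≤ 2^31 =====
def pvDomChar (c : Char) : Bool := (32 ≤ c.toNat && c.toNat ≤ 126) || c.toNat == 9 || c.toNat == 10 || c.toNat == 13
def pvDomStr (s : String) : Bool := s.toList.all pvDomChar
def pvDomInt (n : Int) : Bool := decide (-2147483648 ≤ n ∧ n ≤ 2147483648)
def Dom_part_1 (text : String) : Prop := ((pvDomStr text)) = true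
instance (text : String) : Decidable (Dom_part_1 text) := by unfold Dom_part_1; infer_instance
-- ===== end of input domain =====

-- B replaces A's seen-set/counter loop by an ordered history list whose length is the answer,
-- and A's closed-form modular redistribution by an explicit per-block ring walk (objective: alternative).

-- ===== PORT A =====
-- blocks = tuple(map(int, text.strip().split())) ; int() failure (ValueError) is guarded by getD 0 and excluded by Pre_
def pvParse (text : String) : List Int :=
  (PySem.Str.split₀ (PySem.Str.strip text)).map (fun t => (PySem.Int.ofStr? t).getD 0)

-- fuel for the Python 'while' loop: on Pre_ inputs (nonempty, nonnegative) the loop repeats a state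
-- within (sum+1)^len + 1 iterations (pigeonhole on the finitely many nonnegative states of fixed sum)
def pvFuel (blocks : List Int) : Nat := ((blocks.map Int.natAbs).sum + 1) ^ blocks.length + 1

-- A's redistribute: one-shot closed-form modular formula
def pvRedistA (blocks : List Int) : List Int :=
  let value := (PySem.List.max? blocks (fun x => x)).getD 0
  let size : Int := (blocks.length : Int)
  let idx : Int := (((PySem.List.index? blocks value).map (fun n : Nat => (n : Int))).getD 0)
  let b := PySem.List.pySetD blocks idx 0
  (PySem.List.pyRange 0 size 1).map (fun i =>
    PySem.List.pyGetD b i 0 + PySem.Int.floordiv value size +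
      (if PySem.Int.mod (i - idx - 1) size < PySem.Int.mod value size then 1 else 0))

def pvLoopA : Nat → PySem.Set (List Int) → List Int → Int → Int
  | 0, _, _, result => result
  | fuel + 1, seen, blocks, result =>
    if PySem.Set.contains seen blocks then result
    else pvLoopA fuel (PySem.Set.add seen blocks) (pvRedistA blocks) (result + 1)

def part_1 (text : String) : Int :=
  let blocks := pvParse text
  pvLoopA (pvFuel blocks) PySem.Set.empty blocks 0

-- ===== PORT B =====
-- B's spread: explicit simulation, one block handed out per step around the ring
def pvSpread (blocks : List Int) : List Int :=
  let size : Int := (blocks.length : Int)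
  let value := (PySem.List.max? blocks (fun x => x)).getD 0
  let idx : Int := (((PySem.List.index? blocks value).map (fun n : Nat => (n : Int))).getD 0)
  let out := PySem.List.pySetD blocks idx 0
  (PySem.List.pyRange 0 value 1).foldl
    (fun o s => PySem.List.pySetD o (PySem.Int.mod (idx + 1 + s) size)
      (PySem.List.pyGetD o (PySem.Int.mod (idx + 1 + s) size) 0 + 1)) out

-- B's while loop: append each new state to 'history', answer = len(history)
def pvRun : Nat → List (List Int) → List Int → Int
  | 0, history, _ => (history.length : Int)
  | fuel + 1, history, t =>
    if history.contains t then (history.length : Int)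
    else pvRun fuel (history ++ [t]) (pvSpread t)

def part_1_alt (text : String) : Int :=
  pvRun (pvFuel ((PySem.Str.split₀ (PySem.Str.strip text)).map (fun x => (PySem.Int.ofStr? x).getD 0)))
    []
    ((PySem.Str.split₀ (PySem.Str.strip text)).map (fun x => (PySem.Int.ofStr? x).getD 0))

-- ===== PRECONDITION & SPEC =====
-- Pre_ excludes inputs that make int() or max() raise (non-integer tokens, no tokens) and inputs with
-- negative values: memory banks are nonnegative in this puzzle, and on negative maxima A's closed-form
-- modular formula and B's plain simulation are two different, equally unspecified behaviours.
def Pre_part_1 (text : String) : Prop :=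
  (PySem.Str.split₀ (PySem.Str.strip text)) ≠ [] ∧
  ∀ t ∈ PySem.Str.split₀ (PySem.Str.strip text),
    (PySem.Int.ofStr? t).isSome ∧ 0 ≤ (PySem.Int.ofStr? t).getD 0
instance (text : String) : Decidable (Pre_part_1 text) := by unfold Pre_part_1; infer_instance

def pvWitness_part_1 : String := "0 2 7 0"

def Spec_part_1 (text : String) (out : Int) : Prop := out = part_1_alt text
instance (text : String) (out : Int) : Decidable (Spec_part_1 text out) := by unfold Spec_part_1; infer_instance

-- ===== CLAIM (what is proved, stated in full; the proofs are below) =====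
def Claim_equal_part_1 : Prop := ∀ (text : String), Dom_part_1 text → Pre_part_1 text → Spec_part_1 text (part_1 text)

-- ===== LEMMAS AND PROOFS =====

-- number of k < v with k ≡ r (mod n)
def pvCnt (v : Nat) (r n : Int) : Nat := (List.range v).countP (fun k : Nat => (k : Int) % n = r)

theorem pvCnt_eq (n : Int) (hn : 0 < n) (r : Int) (hr0 : 0 ≤ r) (hrn : r < n) (v : Nat) :
    (pvCnt v r n : Int) = (v : Int) / n + (if r < (v : Int) % n then 1 else 0) := by
  induction v with
  | zero =>
    simp [pvCnt]
    omega
  | succ v ih =>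
    have hsplit : pvCnt (v+1) r n = pvCnt v r n + (if ((v:Int) % n = r) then 1 else 0) := by
      simp [pvCnt, List.range_succ, List.countP_append, List.countP_cons]
    have hq := Int.mul_ediv_add_emod (v : Int) n
    have hs0 : 0 ≤ (v:Int) % n := Int.emod_nonneg _ (by omega)
    have hsn : (v:Int) % n < n := Int.emod_lt_of_pos _ hn
    set q := (v : Int) / n with hqdef
    set s := (v : Int) % n with hsdef
    have hv1 : ((v:Nat)+1 : Int) = (s+1) + n*q := by omega
    by_cases hcase : s + 1 < n
    · have hm : ((v:Nat)+1 : Int) % n = s + 1 := by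
        rw [hv1, Int.add_mul_emod_self_left, Int.emod_eq_of_lt (by omega) hcase]
      have hd : ((v:Nat)+1 : Int) / n = q := by
        rw [hv1, Int.add_mul_ediv_left _ _ (by omega : n ≠ 0), Int.ediv_eq_zero_of_lt (by omega) hcase]
        ring
      rw [hsplit]
      push_cast [apply_ite]
      rw [ih]
      push_cast at hm hd
      rw [hm, hd]
      split_ifs <;> omega
    · have hsn1 : s + 1 = n := by omega
      have hm : ((v:Nat)+1 : Int) % n = 0 := by
        rw [hv1, Int.add_mul_emod_self_left, hsn1, Int.emod_self]
      have hd : ((v:Nat)+1 : Int) / n = q + 1 := by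
        rw [hv1, Int.add_mul_ediv_left _ _ (by omega : n ≠ 0), hsn1, Int.ediv_self (by omega)]
        ring
      rw [hsplit]
      push_cast [apply_ite]
      rw [ih]
      push_cast at hm hd
      rw [hm, hd]
      split_ifs <;> omega

-- the fold step of pvSpread, over Nat steps (value ≥ 0 reduces pyRange to List.range)
def pvStep (idx size : Int) (o : List Int) (k : Nat) : List Int :=
  PySem.List.pySetD o (PySem.Int.mod (idx + 1 + (k : Int)) size)
    (PySem.List.pyGetD o (PySem.Int.mod (idx + 1 + (k : Int)) size) 0 + 1)

theorem pvFold_length (idx size : Int) : ∀ (l : List Nat) (b : List Int),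
    (l.foldl (pvStep idx size) b).length = b.length := by
  intro l
  induction l with
  | nil => intro b; rfl
  | cons x xs ih =>
    intro b
    rw [List.foldl_cons, ih, pvStep, PySem.List.length_pySetD]

theorem pvFold_get (idx size : Int) (hs : 0 < size) : ∀ (v : Nat) (b : List Int),
    size = (b.length : Int) → ∀ (j : Nat), j < b.length →
    ((List.range v).foldl (pvStep idx size) b).getD j 0
      = b.getD j 0 + ((List.range v).countP (fun k : Nat => (idx + 1 + (k : Int)) % size = (j : Int)) : Nat) := by
  intro v
  induction v with
  | zero => intro b _ j hj; simp
  | succ v ih =>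
    intro b hb j hj
    rw [List.range_succ, List.foldl_append, List.foldl_cons, List.foldl_nil,
        List.countP_append]
    set o := (List.range v).foldl (pvStep idx size) b with ho
    have hov : o.length = b.length := pvFold_length idx size _ b
    have hmod : PySem.Int.mod (idx + 1 + (v : Int)) size = (idx + 1 + (v : Int)) % size :=
      PySem.Int.mod_eq_emod_of_pos hs
    have hp0 : 0 ≤ (idx + 1 + (v : Int)) % size := Int.emod_nonneg _ (by omega)
    have hpn : (idx + 1 + (v : Int)) % size < size := Int.emod_lt_of_pos _ hs
    have hplt : ((idx + 1 + (v : Int)) % size).toNat < o.length := by omega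
    have hstep : pvStep idx size o v
        = o.set ((idx + 1 + (v : Int)) % size).toNat (o[((idx + 1 + (v : Int)) % size).toNat]'hplt + 1) := by
      rw [pvStep, hmod, PySem.List.pySetD_of_nonneg _ _ hp0,
          PySem.List.pyGetD_eq_getElem _ _ hp0 (by omega)]
    rw [hstep]
    have hget : (o.set ((idx + 1 + (v : Int)) % size).toNat (o[((idx + 1 + (v : Int)) % size).toNat]'hplt + 1)).getD j 0
        = o.getD j 0 + (if ((idx + 1 + (v : Int)) % size).toNat = j then 1 else 0) := by
      rcases Decidable.em (((idx + 1 + (v : Int)) % size).toNat = j) with h | h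
      · subst h
        simp [List.getD, hplt]
      · simp [List.getD, h]
    rw [hget, ih b hb j hj]
    have hiff : (((idx + 1 + (v : Int)) % size).toNat = j) ↔ ((idx + 1 + (v : Int)) % size = (j : Int)) := by
      omega
    rcases Decidable.em (((idx + 1 + (v : Int)) % size).toNat = j) with h | h
    · simp [hiff.mp h]
      omega
    · have : ¬ ((idx + 1 + (v : Int)) % size = (j : Int)) := fun hc => h (hiff.mpr hc)
      simp [h, this]

theorem pvFold_nonneg (idx size : Int) (hs : 0 < size) : ∀ (l : List Nat) (b : List Int),
    (∀ x ∈ b, 0 ≤ x) → ∀ x ∈ l.foldl (pvStep idx size) b, 0 ≤ x := by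
  intro l
  induction l with
  | nil => intro b hb; exact hb
  | cons k ks ih =>
    intro b hb
    rw [List.foldl_cons]
    apply ih
    intro x hx
    rw [pvStep, PySem.Int.mod_eq_emod_of_pos hs,
        PySem.List.pySetD_of_nonneg _ _ (Int.emod_nonneg _ (by omega))] at hx
    rcases List.mem_or_eq_of_mem_set hx with h | h
    · exact hb x h
    · subst h
      by_cases hg : PySem.List.pyGet? b ((idx + 1 + (k:Int)) % size) = none
      · rw [PySem.List.pyGetD_of_none _ _ _ hg]; omega
      · have hin : PySem.Raise.InRange b.length ((idx + 1 + (k:Int)) % size) := by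
          by_contra hc
          exact hg ((PySem.List.pyGet?_eq_none_iff _ _).mpr hc)
        have := hb _ (PySem.List.pyGetD_mem b 0 hin)
        omega

theorem pvRedist_eq (blocks : List Int) (hne : blocks ≠ []) (hnn : ∀ x ∈ blocks, 0 ≤ x) :
    pvRedistA blocks = pvSpread blocks := by
  have hlen : 0 < blocks.length := List.length_pos_iff.mpr hne
  have hL : (0:Int) < (blocks.length : Int) := by exact_mod_cast hlen
  obtain ⟨m, hmax⟩ : ∃ m, PySem.List.max? blocks (fun x => x) = some m := by
    rcases h : PySem.List.max? blocks (fun x => x) with _ | m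
    · exact absurd ((PySem.List.max?_eq_none_iff _ _).mp h) hne
    · exact ⟨m, rfl⟩
  have hm_mem : m ∈ blocks := PySem.List.max?_mem hmax
  have hm0 : 0 ≤ m := hnn m hm_mem
  obtain ⟨i, hidx⟩ : ∃ i, PySem.List.index? blocks m = some i := by
    have hsome := (PySem.List.index?_isSome_iff blocks m).mpr hm_mem
    rcases h : PySem.List.index? blocks m with _ | i
    · rw [h] at hsome; simp at hsome
    · exact ⟨i, rfl⟩
  obtain ⟨hi_lt, hi_eq, _⟩ := PySem.List.getElem_of_index?_eq_some hidx
  simp only [pvRedistA, pvSpread, hmax, hidx, Option.getD_some, Option.map_some]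
  have hb' : PySem.List.pySetD blocks ((i:Nat) : Int) 0 = blocks.set i 0 := by
    rw [PySem.List.pySetD_of_nonneg _ _ (by omega)]
    simp
  rw [hb']
  have hmN : m = ((m.toNat : Nat) : Int) := by omega
  have hfold : (PySem.List.pyRange 0 m 1).foldl
      (fun o s => PySem.List.pySetD o (PySem.Int.mod ((i:Int) + 1 + s) (blocks.length : Int))
        (PySem.List.pyGetD o (PySem.Int.mod ((i:Int) + 1 + s) (blocks.length : Int)) 0 + 1)) (blocks.set i 0)
      = (List.range m.toNat).foldl (pvStep (i:Int) (blocks.length : Int)) (blocks.set i 0) := by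
    rw [hmN, PySem.List.pyRange_zero_natCast, List.foldl_map]
    rfl
  rw [hfold]
  apply List.ext_getElem
  · simp [PySem.List.pyRange_zero_natCast, pvFold_length]
  · intro j hj1 hj2
    have hj : j < blocks.length := by
      simpa [PySem.List.pyRange_zero_natCast] using hj1
    have hjL : (j : Int) < (blocks.length : Int) := by exact_mod_cast hj
    have hget := pvFold_get (i:Int) (blocks.length : Int) hL m.toNat (blocks.set i 0)
      (by simp) j (by simpa using hj)
    rw [List.getD_eq_getElem _ _ (by rw [pvFold_length]; simpa using hj)] at hget
    rw [hget]
    simp only [PySem.List.pyRange_zero_natCast, List.getElem_map, List.getElem_range]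
    rw [List.getD_eq_getElem _ _ (by simpa using hj),
        PySem.List.pyGetD_natCast,
        List.getD_eq_getElem _ _ (by simpa using hj),
        PySem.Int.floordiv_eq_ediv_of_pos hL,
        PySem.Int.mod_eq_emod_of_pos hL,
        PySem.Int.mod_eq_emod_of_pos hL]
    have hr0 : 0 ≤ ((j:Int) - i - 1) % (blocks.length : Int) := Int.emod_nonneg _ (by omega)
    have hrL : ((j:Int) - i - 1) % (blocks.length : Int) < (blocks.length : Int) :=
      Int.emod_lt_of_pos _ hL
    have hcond : ∀ k : Nat, (((i:Int) + 1 + (k:Int)) % (blocks.length : Int) = (j:Int)) ↔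
        ((k:Int) % (blocks.length : Int) = ((j:Int) - i - 1) % (blocks.length : Int)) := by
      intro k
      have h1 : (j:Int) % (blocks.length : Int) = (j:Int) := Int.emod_eq_of_lt (by omega) hjL
      have harg : (i:Int) + 1 + k - j = (k:Int) - ((j:Int) - i - 1) := by ring
      conv_lhs => rw [← h1]
      rw [Int.emod_eq_emod_iff_emod_sub_eq_zero, harg,
          ← Int.emod_eq_emod_iff_emod_sub_eq_zero]
    rw [List.countP_congr
      (q := fun k : Nat => decide ((k:Int) % (blocks.length : Int) = ((j:Int) - i - 1) % (blocks.length : Int)))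
      (fun x _ => by simp [hcond x])]
    have hpv : (List.range m.toNat).countP
        (fun k : Nat => decide ((k:Int) % (blocks.length : Int) = ((j:Int) - i - 1) % (blocks.length : Int)))
        = pvCnt m.toNat (((j:Int) - i - 1) % (blocks.length : Int)) (blocks.length : Int) := by
      unfold pvCnt
      rfl
    rw [hpv, pvCnt_eq _ hL _ hr0 hrL, Int.toNat_of_nonneg hm0]
    ring

theorem pvSpread_length (blocks : List Int) : (pvSpread blocks).length = blocks.length := by
  unfold pvSpread
  have : ∀ (l : List Int) (b : List Int) (idx size : Int),
      (l.foldl (fun o s => PySem.List.pySetD o (PySem.Int.mod (idx + 1 + s) size)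
        (PySem.List.pyGetD o (PySem.Int.mod (idx + 1 + s) size) 0 + 1)) b).length = b.length := by
    intro l
    induction l with
    | nil => intro b idx size; rfl
    | cons x xs ih => intro b idx size; rw [List.foldl_cons, ih, PySem.List.length_pySetD]
  rw [this, PySem.List.length_pySetD]

theorem pvSpread_nonneg (blocks : List Int) (hne : blocks ≠ []) (hnn : ∀ x ∈ blocks, 0 ≤ x) :
    ∀ x ∈ pvSpread blocks, 0 ≤ x := by
  have hlen : 0 < blocks.length := List.length_pos_iff.mpr hne
  have hL : (0:Int) < (blocks.length : Int) := by exact_mod_cast hlen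
  obtain ⟨m, hmax⟩ : ∃ m, PySem.List.max? blocks (fun x => x) = some m := by
    rcases h : PySem.List.max? blocks (fun x => x) with _ | m
    · exact absurd ((PySem.List.max?_eq_none_iff _ _).mp h) hne
    · exact ⟨m, rfl⟩
  have hm0 : 0 ≤ m := hnn m (PySem.List.max?_mem hmax)
  obtain ⟨i, hidx⟩ : ∃ i, PySem.List.index? blocks m = some i := by
    have hsome := (PySem.List.index?_isSome_iff blocks m).mpr (PySem.List.max?_mem hmax)
    rcases h : PySem.List.index? blocks m with _ | i
    · rw [h] at hsome; simp at hsome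
    · exact ⟨i, rfl⟩
  unfold pvSpread
  simp only [hmax, hidx, Option.getD_some, Option.map_some]
  have hmN : m = ((m.toNat : Nat) : Int) := by omega
  rw [hmN, PySem.List.pyRange_zero_natCast, List.foldl_map]
  have hb0 : ∀ x ∈ PySem.List.pySetD blocks ((i:Nat) : Int) 0, 0 ≤ x := by
    intro x hx
    rw [PySem.List.pySetD_of_nonneg _ _ (by omega)] at hx
    rcases List.mem_or_eq_of_mem_set hx with h | h
    · exact hnn x h
    · omega
  exact pvFold_nonneg (i:Int) (blocks.length : Int) hL (List.range m.toNat) _ hb0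

theorem pvLoop_eq : ∀ (fuel : Nat) (seen : PySem.Set (List Int)) (history : List (List Int))
    (blocks : List Int) (result : Int),
    (∀ b, PySem.Set.contains seen b = history.contains b) →
    result = (history.length : Int) →
    blocks ≠ [] → (∀ x ∈ blocks, 0 ≤ x) →
    pvLoopA fuel seen blocks result = pvRun fuel history blocks := by
  intro fuel
  induction fuel with
  | zero => intro seen history blocks result _ hres _ _; simpa [pvLoopA, pvRun] using hres
  | succ n ih =>
    intro seen history blocks result hseen hres hne hnn
    rw [pvLoopA, pvRun, hseen blocks]
    split_ifs with h
    · exact hres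
    · rw [pvRedist_eq blocks hne hnn]
      apply ih
      · intro b
        have hb : blocks ∉ seen := by
          have hs := hseen blocks
          simp only [PySem.Set.contains_eq_listContains, List.contains_eq_mem,
            decide_eq_decide] at hs
          simp only [List.contains_eq_mem, decide_eq_true_eq] at h
          exact fun hm => h (hs.mp hm)
        have hadd : PySem.Set.add seen blocks = seen ++ [blocks] := by
          simp [PySem.Set.add, hb]
        rw [hadd]
        have hs := hseen b
        simp only [PySem.Set.contains_eq_listContains, List.contains_eq_mem] at hs ⊢
        simp only [List.mem_append, List.mem_singleton] at hs ⊢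
        rw [decide_eq_decide] at hs ⊢
        tauto
      · simp only [List.length_append, List.length_cons, List.length_nil]
        omega
      · intro hnil
        have := pvSpread_length blocks
        rw [hnil] at this
        simp at this
        exact hne (List.eq_nil_of_length_eq_zero this.symm)
      · exact pvSpread_nonneg blocks hne hnn

-- ===== VERDICT (by name: the statement is the Claim_ definition above) =====
theorem part_1_spec : Claim_equal_part_1 := by
  intro text _hdom hpre
  unfold Spec_part_1 part_1 part_1_alt
  obtain ⟨hne, hall⟩ := hpre
  apply pvLoop_eq
  · intro b; rfl
  · rfl
  · simpa [pvParse] using hne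
  · intro x hx
    simp only [pvParse, List.mem_map] at hx
    obtain ⟨t, ht, rfl⟩ := hx
    exact (hall t ht).2
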